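-- pv_equiv track=rewrite | github.com/DiogoCaetanoGarcia/eval_ital | converte_pasta_xml_em_xlsx.py | count_prods
-- ===== SOURCE A (Python) =====
-- def count_prods(prods_vals, prods_keys=[]):
-- 	full_count = len(prods_vals)
-- 	if len(prods_keys)==0:
-- 		prods_keys = set("/".join(prods_vals).split("/"))
-- 	prods = []
-- 	for ak in prods_keys:
-- 		if len(prods)==0:
-- 			prods = [ak in g for g in prods_vals]
-- 		else:
-- 			prods = [a or b for a,b in zip(prods, [ak in g for g in prods_vals])]
-- 	return sum(prods)
-- ===== SOURCE B (Python) =====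
-- def count_prods(prods_vals, prods_keys=[]):
--     keys = prods_keys if prods_keys else set("/".join(prods_vals).split("/"))
--     return sum(1 for g in prods_vals if any(k in g for k in keys))
-- ===== Notes on version B (the rewrite author's own statement) =====
-- stated objective: faster
-- what changed: B scans each string once with an early-exit any() over the keys instead of building and OR-merging one full boolean list per key.
import Mathlib
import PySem

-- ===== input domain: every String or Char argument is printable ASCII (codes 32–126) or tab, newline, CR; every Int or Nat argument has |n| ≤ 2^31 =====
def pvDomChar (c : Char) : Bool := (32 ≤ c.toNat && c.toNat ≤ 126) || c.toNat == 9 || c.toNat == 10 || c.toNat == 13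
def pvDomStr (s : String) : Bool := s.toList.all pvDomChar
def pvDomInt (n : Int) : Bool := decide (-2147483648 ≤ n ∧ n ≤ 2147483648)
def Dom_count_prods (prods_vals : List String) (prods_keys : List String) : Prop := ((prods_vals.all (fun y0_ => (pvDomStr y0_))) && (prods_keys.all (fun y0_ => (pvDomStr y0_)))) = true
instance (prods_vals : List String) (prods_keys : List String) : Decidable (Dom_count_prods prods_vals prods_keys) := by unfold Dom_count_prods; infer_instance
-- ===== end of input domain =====

-- B replaces A's per-key pass that OR-merges a full boolean list per key by a single
-- per-string pass with an early-exit any() over the keys (objective: faster, constant-factor).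

-- ===== PORT A =====
-- one step of A's 'for ak in prods_keys' loop
def count_prods_step (prods_vals : List String) (prods : List Bool) (ak : String) : List Bool :=
  if prods.length == 0 then
    prods_vals.map (fun g => PySem.Str.isIn ak g)
  else
    (prods.zip (prods_vals.map (fun g => PySem.Str.isIn ak g))).map (fun ab => ab.1 || ab.2)

def count_prods (prods_vals : List String) (prods_keys : List String) : Int :=
  -- full_count = len(prods_vals) is computed by A but never used
  let prods_keys' :=
    if prods_keys.length == 0 then
      PySem.Set.ofList (((PySem.Str.split? (PySem.Str.join "/" prods_vals) "/").getD []))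
    else prods_keys
  let prods := prods_keys'.foldl (count_prods_step prods_vals) []
  (prods.map (fun b => if b then (1 : Int) else 0)).sum

-- ===== PORT B =====
def count_prods_alt (prods_vals : List String) (prods_keys : List String) : Int :=
  let keys :=
    if prods_keys.isEmpty then
      PySem.Set.ofList (((PySem.Str.split? (PySem.Str.join "/" prods_vals) "/").getD []))
    else prods_keys
  ((prods_vals.countP (fun g => keys.any (fun k => PySem.Str.isIn k g)) : Nat) : Int)

-- ===== PRECONDITION & SPEC =====
def Spec_count_prods (prods_vals : List String) (prods_keys : List String) (out : Int) : Prop := out = count_prods_alt prods_vals prods_keys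
instance (prods_vals : List String) (prods_keys : List String) (out : Int) : Decidable (Spec_count_prods prods_vals prods_keys out) := by unfold Spec_count_prods; infer_instance

-- ===== CLAIM (what is proved, stated in full; the proofs are below) =====
def Claim_equal_count_prods : Prop := ∀ (prods_vals : List String) (prods_keys : List String), Dom_count_prods prods_vals prods_keys → Spec_count_prods prods_vals prods_keys (count_prods prods_vals prods_keys)

-- ===== LEMMAS AND PROOFS =====

-- invariant of A's key loop: starting from a mapped state, it stays a mapped state
lemma count_prods_fold_map (vs : List String) (ks : List String) :
    ∀ p : String → Bool,
      ks.foldl (count_prods_step vs) (vs.map p)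
        = vs.map (fun g => p g || ks.any (fun k => PySem.Str.isIn k g)) := by
  induction ks with
  | nil => intro p; simp
  | cons k ks ih =>
    intro p
    have hstep : count_prods_step vs (vs.map p) k
        = vs.map (fun g => p g || PySem.Str.isIn k g) := by
      unfold count_prods_step
      rcases vs with _ | ⟨v, vs⟩
      · simp
      · simp [List.zip_map']
    simp only [List.foldl_cons, hstep, ih]
    simp [Bool.or_assoc]

-- sum of 0/1 indicators = countP
lemma count_prods_sum_indicator (vs : List String) (q : String → Bool) :
    ((vs.map (fun g => if q g then (1 : Int) else 0)).sum)
      = ((vs.countP q : Nat) : Int) := by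
  induction vs with
  | nil => simp
  | cons v vs ih =>
    by_cases h : q v <;> simp [h, ih, Int.add_comm]

-- ===== VERDICT (by name: the statement is the Claim_ definition above) =====
theorem count_prods_spec : Claim_equal_count_prods := by
  intro vs pks _
  unfold Spec_count_prods count_prods count_prods_alt
  have hkeys : (if pks.length == 0 then
      PySem.Set.ofList (((PySem.Str.split? (PySem.Str.join "/" vs) "/").getD [])) else pks)
    = (if pks.isEmpty then
      PySem.Set.ofList (((PySem.Str.split? (PySem.Str.join "/" vs) "/").getD [])) else pks) := by
    cases pks <;> rfl
  rw [hkeys]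
  set ks := (if pks.isEmpty then
      PySem.Set.ofList (((PySem.Str.split? (PySem.Str.join "/" vs) "/").getD [])) else pks) with hks
  clear_value ks
  rcases ks with _ | ⟨k, ks⟩
  · simp
  · have h0 : count_prods_step vs [] k = vs.map (fun g => PySem.Str.isIn k g) := by
      unfold count_prods_step; simp
    simp only [List.foldl_cons, h0, count_prods_fold_map]
    rw [List.map_map]
    simp only [Function.comp_def]
    rw [count_prods_sum_indicator]
    simp [List.any_cons]
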